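-- pv_equiv track=rewrite | github.com/wlghsp/ProblemSolving_Everyday | 카카오 코테 6주 합격! 실전 파이썬 코딩테스트/250121_과외/boj1107_리모컨/리모컨-1.py | generate_comb_numbers
-- ===== SOURCE A (Python) =====
-- from itertools import product
--
-- def generate_comb_numbers(first_digits, remote_buttons, length):
--     comb_numbers = []
--     if len(remote_buttons) == 1:
--         for i in range(1, length + 2):
--             comb_numbers.append(int(str(remote_buttons[0]) * i))
--         return comb_numbers
--     else:
--         for first in first_digits:
--             for comb in product(remote_buttons, repeat= length - 1):
--                 num = int(str(first) + ''.join(map(str, comb)))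
--                 comb_numbers.append(num)
--     return comb_numbers
-- ===== SOURCE B (Python) =====
-- def generate_comb_numbers(first_digits, remote_buttons, length):
--     if len(remote_buttons) == 1:
--         piece = str(remote_buttons[0])
--         full = piece * (length + 1)
--         return [int(full[:len(piece) * i]) for i in range(1, length + 2)]
--     m = len(remote_buttons)
--     n = length - 1
--     total = len(first_digits) * m ** n
--     out = []
--     for k in range(total):
--         q = k
--         digits = []
--         for _ in range(n):
--             q, r = divmod(q, m)
--             digits.append(str(remote_buttons[r]))
--         digits.reverse()
--         out.append(int(str(first_digits[q]) + ''.join(digits)))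
--     return out
-- ===== Notes on version B (the rewrite author's own statement) =====
-- stated objective: alternative
-- what changed: Replaces the nested first-digit x itertools.product enumeration with a single flat counting loop: k runs over range(len(first_digits)*m**(length-1)) and each candidate is decoded from k by repeated divmod in base m (mixed-radix index decoding); the single-button branch builds one full repetition string and takes growing prefixes instead of re-multiplying str(b)*i.
-- outside the precondition, e.g. on generate_comb_numbers([], [1, 2], 0): A returns [], B raises TypeError; on generate_comb_numbers([], [], -1): A returns [], B raises ZeroDivisionError
import Mathlib
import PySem

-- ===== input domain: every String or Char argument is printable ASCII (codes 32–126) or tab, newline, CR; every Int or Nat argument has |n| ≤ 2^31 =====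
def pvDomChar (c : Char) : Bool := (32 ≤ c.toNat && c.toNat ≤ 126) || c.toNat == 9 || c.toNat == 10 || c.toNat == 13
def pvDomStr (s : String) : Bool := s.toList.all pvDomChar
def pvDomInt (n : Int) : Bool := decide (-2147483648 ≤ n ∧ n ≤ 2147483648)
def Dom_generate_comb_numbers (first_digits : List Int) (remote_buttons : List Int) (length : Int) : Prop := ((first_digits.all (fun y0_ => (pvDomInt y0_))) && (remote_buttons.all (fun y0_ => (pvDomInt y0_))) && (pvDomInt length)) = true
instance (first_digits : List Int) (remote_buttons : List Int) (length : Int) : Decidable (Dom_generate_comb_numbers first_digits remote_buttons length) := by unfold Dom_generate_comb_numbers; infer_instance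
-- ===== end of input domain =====

-- B replaces A's nested first-digit x itertools.product enumeration by one flat counting loop that
-- decodes each index k by repeated divmod in base m (and by prefix-slicing one repetition string in the
-- single-button branch); objective: alternative, same asymptotic cost.
-- ===== PORT A =====
-- itertools.product(remote_buttons, repeat = n): lexicographic, first coordinate slowest.
def pvProd (rb : List Int) : Nat → List (List Int)
  | 0 => [[]]
  | n + 1 => rb.flatMap (fun b => (pvProd rb n).map (fun c => b :: c))

-- '.getD 0' marks exactly the int(...) ValueErrors, and '.toNat' the negative-repeat ValueError,
-- both excluded by Pre_; everywhere else the port is exact.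
def generate_comb_numbers (first_digits : List Int) (remote_buttons : List Int) (length : Int) : List Int :=
  if remote_buttons.length = 1 then
    (PySem.List.pyRange 1 (length + 2) 1).foldl
      (fun acc i =>
        acc ++ [(PySem.Int.ofChars? (PySem.List.pyRepeat (PySem.Int.toChars ((PySem.List.pyGet? remote_buttons 0).getD 0)) i)).getD 0])
      []
  else
    first_digits.foldl
      (fun acc first =>
        (pvProd remote_buttons (length - 1).toNat).foldl
          (fun acc2 comb =>
            acc2 ++ [(PySem.Int.ofChars? (PySem.Int.toChars first ++ PySem.Chars.join [] (comb.map PySem.Int.toChars))).getD 0])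
          acc)
      []

-- ===== PORT B =====
-- body of B's inner decoding loop: q, r = divmod(q, m); digits.append(str(remote_buttons[r]))
def pvStep (rb : List Int) (st : Int × List (List Char)) : Int × List (List Char) :=
  (PySem.Int.floordiv st.1 (rb.length : Int),
   st.2 ++ [PySem.Int.toChars ((PySem.List.pyGet? rb (PySem.Int.mod st.1 (rb.length : Int))).getD 0)])

-- '.getD 0' marks the int(...) ValueErrors excluded by Pre_, and '.toNat' on the exponent the
-- non-integer m ** (length-1) (reachable only outside Pre_); everywhere else the port is exact.
def generate_comb_numbers_alt (first_digits : List Int) (remote_buttons : List Int) (length : Int) : List Int :=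
  if remote_buttons.length = 1 then
    let piece := PySem.Int.toChars ((PySem.List.pyGet? remote_buttons 0).getD 0)
    let full := PySem.List.pyRepeat piece (length + 1)
    (PySem.List.pyRange 1 (length + 2) 1).map
      (fun i => (PySem.Int.ofChars? (PySem.List.slice full (some 0) (some ((piece.length : Int) * i)))).getD 0)
  else
    let n := length - 1
    let total := (first_digits.length : Int) * (remote_buttons.length : Int) ^ n.toNat
    (PySem.List.pyRange 0 total 1).foldl
      (fun out k =>
        let st := (PySem.List.pyRange 0 n 1).foldl (fun st _ => pvStep remote_buttons st) (k, [])
        out ++ [(PySem.Int.ofChars? (PySem.Int.toChars ((PySem.List.pyGet? first_digits st.1).getD 0)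
                  ++ PySem.Chars.join [] st.2.reverse)).getD 0])
      []

-- ===== PRECONDITION & SPEC =====
-- Pre_ excludes exactly the inputs where one of the Pythons raises: with a single button, a negative
-- button repeated (length >= 1: int(...) ValueError in both); otherwise length <= 0 (A raises
-- product(repeat<0) ValueError when first_digits is nonempty, and when first_digits = [] A returns []
-- but B's m ** (length-1) is not an integer, so B raises) and, for length >= 2 with first_digits
-- nonempty, a negative button (int(...) ValueError in both).
def Pre_generate_comb_numbers (first_digits : List Int) (remote_buttons : List Int) (length : Int) : Prop :=
  if remote_buttons.length = 1 then
    length ≤ 0 ∨ ∀ b ∈ remote_buttons, 0 ≤ b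
  else
    1 ≤ length ∧ (first_digits = [] ∨ length = 1 ∨ ∀ b ∈ remote_buttons, 0 ≤ b)
instance (first_digits : List Int) (remote_buttons : List Int) (length : Int) : Decidable (Pre_generate_comb_numbers first_digits remote_buttons length) := by unfold Pre_generate_comb_numbers; infer_instance

def pvWitness_generate_comb_numbers : List Int × List Int × Int := ([1, 2], [0, 5], 2)

def Spec_generate_comb_numbers (first_digits : List Int) (remote_buttons : List Int) (length : Int) (out : List Int) : Prop := out = generate_comb_numbers_alt first_digits remote_buttons length
instance (first_digits : List Int) (remote_buttons : List Int) (length : Int) (out : List Int) : Decidable (Spec_generate_comb_numbers first_digits remote_buttons length out) := by unfold Spec_generate_comb_numbers; infer_instance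

-- ===== CLAIM (what is proved, stated in full; the proofs are below) =====
def Claim_equal_generate_comb_numbers : Prop := ∀ (first_digits : List Int) (remote_buttons : List Int) (length : Int), Dom_generate_comb_numbers first_digits remote_buttons length → Pre_generate_comb_numbers first_digits remote_buttons length → Spec_generate_comb_numbers first_digits remote_buttons length (generate_comb_numbers first_digits remote_buttons length)

-- ===== LEMMAS AND PROOFS =====
-- msb-first base-m digits of an index (proof-side description of B's decoding)
def pvDig (m : Nat) : Nat → Nat → List Nat
  | 0, _ => []
  | N + 1, j => pvDig m N (j / m) ++ [j % m]

theorem pvJoinNilFlatten (parts : List (List Char)) : PySem.Chars.join [] parts = parts.flatten := by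
  induction parts with
  | nil => simp [PySem.Chars.join_nil]
  | cons p rest ih =>
    cases rest with
    | nil => simp [PySem.Chars.join_singleton]
    | cons q r =>
      rw [PySem.Chars.join_cons_cons]
      simp_all

theorem pvProdSnoc (rb : List Int) (n : Nat) :
    pvProd rb (n + 1) = (pvProd rb n).flatMap (fun c => rb.map (fun b => c ++ [b])) := by
  induction n with
  | zero =>
    simp only [pvProd]
    induction rb with
    | nil => simp
    | cons a t iht => simp_all
  | succ n ih =>
    conv_lhs => rw [show pvProd rb (n + 2)
      = rb.flatMap (fun b => (pvProd rb (n + 1)).map (fun c => b :: c)) from rfl, ih]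
    conv_rhs => rw [show pvProd rb (n + 1)
      = rb.flatMap (fun b => (pvProd rb n).map (fun c => b :: c)) from rfl]
    simp [List.map_flatMap, List.flatMap_map, List.flatMap_assoc, Function.comp_def]

theorem pvFoldlIgnoreIterate {α β : Type} (f : β → β) (l : List α) (s : β) :
    l.foldl (fun st _ => f st) s = f^[l.length] s := by
  induction l generalizing s with
  | nil => rfl
  | cons x t ih => simp [ih, Function.iterate_succ_apply]

theorem pvRangeMul (a b : Nat) :
    List.range (a * b) = (List.range a).flatMap (fun q => (List.range b).map (fun r => q * b + r)) := by
  induction a with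
  | zero => simp
  | succ a ih =>
    rw [Nat.succ_mul, List.range_add, ih, List.range_succ]
    simp

theorem pvGetRange (l : List Int) :
    (List.range l.length).map (fun r => (PySem.List.pyGet? l ((r : Nat) : Int)).getD 0) = l := by
  apply List.ext_getElem (by simp)
  intro i h1 h2
  simp only [List.getElem_map, List.getElem_range, PySem.List.pyGet?_natCast,
    List.getElem?_eq_getElem h2, Option.getD_some]

-- decode: N divmod steps starting at i*m^N+j peel off the base-m digits of j (lsb first) and leave i.
theorem pvDecode (rb : List Int) (N : Nat) :
    ∀ (i j : Nat) (acc : List (List Char)), j < rb.length ^ N →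
    (pvStep rb)^[N] (((i * rb.length ^ N + j : Nat) : Int), acc)
    = (((i : Nat) : Int),
       acc ++ ((pvDig rb.length N j).map
         (fun d => PySem.Int.toChars ((PySem.List.pyGet? rb ((d : Nat) : Int)).getD 0))).reverse) := by
  induction N with
  | zero =>
    intro i j acc hj
    simp only [pow_zero, Nat.lt_one_iff] at hj
    have hj0 : j = 0 := hj
    subst hj0
    simp [pvDig]
  | succ N ih =>
    intro i j acc hj
    have hm : 0 < rb.length := by
      rcases Nat.eq_zero_or_pos rb.length with h | h
      · rw [h] at hj; simp at hj
      · exact h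
    have E : i * rb.length ^ (N + 1) + j
        = rb.length * (i * rb.length ^ N + j / rb.length) + j % rb.length := by
      conv_lhs => rw [← Nat.div_add_mod j rb.length]
      ring
    have h1 : PySem.Int.floordiv (((i * rb.length ^ (N + 1) + j : Nat) : Int)) ((rb.length : Nat) : Int)
        = (((i * rb.length ^ N + j / rb.length : Nat) : Int)) := by
      rw [PySem.Int.floordiv_natCast]
      congr 1
      rw [E, Nat.mul_add_div hm, Nat.div_eq_of_lt (Nat.mod_lt j hm), Nat.add_zero]
    have h2 : PySem.Int.mod (((i * rb.length ^ (N + 1) + j : Nat) : Int)) ((rb.length : Nat) : Int)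
        = (((j % rb.length : Nat) : Int)) := by
      rw [PySem.Int.mod_natCast]
      congr 1
      rw [E, Nat.mul_add_mod]
      exact Nat.mod_mod_of_dvd j dvd_rfl
    have hstep : pvStep rb (((i * rb.length ^ (N + 1) + j : Nat) : Int), acc)
        = (((i * rb.length ^ N + j / rb.length : Nat) : Int),
           acc ++ [PySem.Int.toChars ((PySem.List.pyGet? rb ((j % rb.length : Nat) : Int)).getD 0)]) := by
      simp only [pvStep]
      rw [h1, h2]
    rw [Function.iterate_succ_apply, hstep,
      ih i (j / rb.length) _ ((Nat.div_lt_iff_lt_mul hm).mpr (by rw [← pow_succ]; exact hj))]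
    simp only [pvDig, List.map_append, List.map_cons, List.map_nil, List.reverse_append,
      List.reverse_cons, List.reverse_nil, List.nil_append,
      List.append_assoc, List.cons_append]

-- enumeration: decoding every index below m^N yields exactly itertools.product's order.
theorem pvDigProd (rb : List Int) (N : Nat) :
    (List.range (rb.length ^ N)).map
      (fun j => (pvDig rb.length N j).map (fun d => (PySem.List.pyGet? rb ((d : Nat) : Int)).getD 0))
    = pvProd rb N := by
  induction N with
  | zero => simp [pvDig, pvProd]
  | succ N ih =>
    rcases Nat.eq_zero_or_pos rb.length with hm | hm
    · have hrb : rb = [] := List.length_eq_zero_iff.mp hm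
      subst hrb
      simp [pvProd]
    · rw [pow_succ, pvRangeMul, pvProdSnoc, ← ih, List.map_flatMap, List.flatMap_map,
        List.flatMap_def, List.flatMap_def]
      refine congrArg List.flatten (List.map_congr_left fun q hq => ?_)
      have hinner : ∀ r ∈ List.range rb.length,
          (pvDig rb.length (N + 1) (q * rb.length + r)).map
              (fun d => (PySem.List.pyGet? rb ((d : Nat) : Int)).getD 0)
          = (pvDig rb.length N q).map (fun d => (PySem.List.pyGet? rb ((d : Nat) : Int)).getD 0)
            ++ [(PySem.List.pyGet? rb ((r : Nat) : Int)).getD 0] := by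
        intro r hr
        have hr' : r < rb.length := List.mem_range.mp hr
        have hd : (q * rb.length + r) / rb.length = q := by
          rw [Nat.mul_comm q rb.length, Nat.mul_add_div hm, Nat.div_eq_of_lt hr', Nat.add_zero]
        have hmo : (q * rb.length + r) % rb.length = r := by
          rw [Nat.mul_comm q rb.length, Nat.mul_add_mod]
          exact Nat.mod_eq_of_lt hr'
        simp [pvDig, hd, hmo]
      simp only [List.map_map, Function.comp_def]
      rw [List.map_congr_left hinner,
        show (fun r => (pvDig rb.length N q).map
              (fun d => (PySem.List.pyGet? rb ((d : Nat) : Int)).getD 0)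
            ++ [(PySem.List.pyGet? rb ((r : Nat) : Int)).getD 0])
          = (fun b => (pvDig rb.length N q).map
              (fun d => (PySem.List.pyGet? rb ((d : Nat) : Int)).getD 0) ++ [b])
            ∘ (fun r => (PySem.List.pyGet? rb ((r : Nat) : Int)).getD 0) from rfl,
        ← List.map_map, pvGetRange]

-- prefixes of a repeated block are shorter repetitions.
theorem pvTakeRep (p : List Char) (i : Nat) :
    ∀ t : Nat, i ≤ t →
    (List.replicate t p).flatten.take (p.length * i) = (List.replicate i p).flatten := by
  induction i with
  | zero => intro t _; simp
  | succ i ih =>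
    intro t ht
    cases t with
    | zero => omega
    | succ t' =>
      rw [List.replicate_succ, List.flatten_cons, Nat.mul_succ, Nat.add_comm, List.take_append]
      rw [List.take_of_length_le (by omega)]
      have hc : p.length + p.length * i - p.length = p.length * i := by omega
      rw [hc, ih t' (by omega), List.replicate_succ, List.flatten_cons]

theorem pvMain (first_digits remote_buttons : List Int) (length : Int) :
    generate_comb_numbers first_digits remote_buttons length
    = generate_comb_numbers_alt first_digits remote_buttons length := by
  by_cases h : remote_buttons.length = 1
  · simp only [generate_comb_numbers, generate_comb_numbers_alt, if_pos h,
      PySem.List.foldl_append_singleton_eq_map, List.nil_append]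
    refine List.map_congr_left fun i hi => ?_
    obtain ⟨hi1, hi2⟩ := (PySem.List.mem_pyRange_one).mp hi
    have hslice : PySem.List.slice
        (PySem.List.pyRepeat (PySem.Int.toChars ((PySem.List.pyGet? remote_buttons 0).getD 0)) (length + 1))
        (some 0)
        (some (((PySem.Int.toChars ((PySem.List.pyGet? remote_buttons 0).getD 0)).length : Int) * i))
      = PySem.List.pyRepeat (PySem.Int.toChars ((PySem.List.pyGet? remote_buttons 0).getD 0)) i := by
      set p := PySem.Int.toChars ((PySem.List.pyGet? remote_buttons 0).getD 0) with hp
      have hnn : (0 : Int) ≤ (p.length : Int) * i :=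
        mul_nonneg (Int.natCast_nonneg _) (by omega)
      rw [PySem.List.slice_zero_start, PySem.List.slice_to _ hnn]
      have hcount : ((p.length : Int) * i).toNat = p.length * i.toNat := by
        conv_lhs => rw [← Int.toNat_of_nonneg (show (0:Int) ≤ i by omega)]
        rw [← Int.natCast_mul, Int.toNat_natCast]
      rw [hcount]
      show (List.replicate (length + 1).toNat p).flatten.take (p.length * i.toNat)
        = (List.replicate i.toNat p).flatten
      exact pvTakeRep p i.toNat (length + 1).toNat (by omega)
    rw [hslice]
  · simp only [generate_comb_numbers, generate_comb_numbers_alt, if_neg h,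
      PySem.List.foldl_append_singleton_eq_map, PySem.List.foldl_append_eq_flatMap, List.nil_append]
    rw [PySem.List.pyRange_one 0 (length - 1), PySem.List.pyRange_one 0
      ((first_digits.length : Int) * (remote_buttons.length : Int) ^ (length - 1).toNat)]
    have htot : (((first_digits.length : Int) * (remote_buttons.length : Int) ^ (length - 1).toNat - 0)).toNat
        = first_digits.length * remote_buttons.length ^ (length - 1).toNat := by
      rw [sub_zero, ← Int.natCast_pow, ← Int.natCast_mul, Int.toNat_natCast]
    rw [htot, List.map_map, pvRangeMul]
    conv_lhs => rw [← pvGetRange first_digits]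
    rw [List.flatMap_map, List.map_flatMap, List.flatMap_def, List.flatMap_def]
    refine congrArg List.flatten (List.map_congr_left fun i hi => ?_)
    rw [List.map_map, ← pvDigProd remote_buttons (length - 1).toNat, List.map_map]
    refine List.map_congr_left fun j hj => ?_
    have hjM : j < remote_buttons.length ^ (length - 1).toNat := List.mem_range.mp hj
    simp only [Function.comp_def, zero_add]
    rw [List.foldl_map, sub_zero,
      pvFoldlIgnoreIterate (pvStep remote_buttons), List.length_range,
      pvDecode remote_buttons (length - 1).toNat i j [] hjM]
    simp only [List.nil_append, List.reverse_reverse, pvJoinNilFlatten, List.map_map]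
    rfl

-- ===== VERDICT (by name: the statement is the Claim_ definition above) =====
theorem generate_comb_numbers_spec : Claim_equal_generate_comb_numbers := by
  intro first_digits remote_buttons length _ _
  exact pvMain first_digits remote_buttons length
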